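-- pv_equiv track=rewrite | github.com/LoganXav/GenomicsDnaToolkit | bio_seq.py | __proteins_from_rf
-- ===== SOURCE A (Python) =====
-- def __proteins_from_rf(aa_seq):
--     """Compute all possible proteins in an amino acid sequence and return a list of possible proteins"""
--     currentProtein = []
--     proteins = []
--     for aa in aa_seq:
--         if aa == "_":
--             # STOP accumulating amino acids
--             if currentProtein: # if the current protein list isn't empty
--                 for p in currentProtein:
--                     proteins.append(p) # add all the proteins so far and empty the list
--                 currentProtein = []
--         else:
--             # START accumulating amino acids
--             if aa == "M":
--                 # everytime it finds an M, it creates a new entry in the list and accumulates each entry until it finds a stop codon that resets it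
--                 currentProtein.append("")
--             for i in range(len(currentProtein)):
--                 currentProtein[i] += aa
--     return proteins
-- ===== SOURCE B (Python) =====
-- def __proteins_from_rf(aa_seq):
--     """Compute all possible proteins in an amino acid sequence and return a list of possible proteins"""
--     proteins = []
--     segments = aa_seq.split("_")
--     for seg in segments[:-1]:
--         for i, aa in enumerate(seg):
--             if aa == "M":
--                 proteins.append(seg[i:])
--     return proteins
-- ===== Notes on version B (the rewrite author's own statement) =====
-- stated objective: faster
-- what changed: Instead of maintaining a list of partially built proteins and extending every one of them on each character (quadratic in clustered start codons), B splits the sequence at stop codons, drops the never-flushed tail segment, and at each start codon emits the segment suffix directly.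
import Mathlib
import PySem

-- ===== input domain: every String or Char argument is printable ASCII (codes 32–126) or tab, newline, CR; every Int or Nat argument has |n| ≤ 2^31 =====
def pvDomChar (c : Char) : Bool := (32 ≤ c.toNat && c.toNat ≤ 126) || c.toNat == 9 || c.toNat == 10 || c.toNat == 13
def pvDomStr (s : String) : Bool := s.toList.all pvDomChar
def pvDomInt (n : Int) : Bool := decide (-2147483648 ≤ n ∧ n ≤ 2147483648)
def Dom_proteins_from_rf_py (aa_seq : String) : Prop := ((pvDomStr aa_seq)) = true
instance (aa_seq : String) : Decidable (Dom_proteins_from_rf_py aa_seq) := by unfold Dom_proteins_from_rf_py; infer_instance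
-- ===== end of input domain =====

-- B replaces A's per-character extension of every open protein by a split at stop codons
-- with direct suffix extraction at each 'M' (faster: avoids re-building each open protein).


-- ===== PORT A =====
-- Python strings built character by character are carried as List Char and turned
-- into String (String.mk) at the points where A appends them to `proteins`.
def pvStepA (st : List (List Char) × List String) (aa : Char) : List (List Char) × List String :=
  if aa = '_' then
    -- STOP: flush currentProtein into proteins if nonempty
    if st.1 ≠ [] then ([], st.2 ++ st.1.map (fun p => String.mk p)) else st
  else
    -- START/accumulate: on 'M' open a new entry, then append aa to every entry
    let cur := if aa = 'M' then st.1 ++ [[]] else st.1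
    (cur.map (fun p => p ++ [aa]), st.2)

def proteins_from_rf_py (aa_seq : String) : List String :=
  (aa_seq.toList.foldl pvStepA ([], [])).2

-- ===== PORT B =====
def proteins_from_rf_py_alt (aa_seq : String) : List String :=
  -- segments = aa_seq.split("_"); loop over segments[:-1]
  (PySem.List.slice (PySem.Chars.splitOn aa_seq.toList ['_']) none (some (-1))).foldl
    (fun res seg =>
      (PySem.List.enumerate seg).foldl                           -- for i, aa in enumerate(seg)
        (fun res p =>
          if p.2 = 'M' then
            res ++ [String.mk (PySem.List.slice seg (some p.1) none)]  -- seg[i:]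
          else res) res) []

-- ===== PRECONDITION & SPEC =====
def Spec_proteins_from_rf_py (aa_seq : String) (out : List String) : Prop := out = proteins_from_rf_py_alt aa_seq
instance (aa_seq : String) (out : List String) : Decidable (Spec_proteins_from_rf_py aa_seq out) := by unfold Spec_proteins_from_rf_py; infer_instance

-- ===== CLAIM (what is proved, stated in full; the proofs are below) =====
def Claim_equal_proteins_from_rf_py : Prop := ∀ (aa_seq : String), Dom_proteins_from_rf_py aa_seq → Spec_proteins_from_rf_py aa_seq (proteins_from_rf_py aa_seq)

-- ===== LEMMAS AND PROOFS =====

/-- Reference single-char split on '_'. -/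
def pvSplitC : List Char → List (List Char)
  | [] => [[]]
  | c :: t => if c = '_' then [] :: pvSplitC t else (pvSplitC t).modifyHead (c :: ·)

/-- Reference join with '_' as separator. -/
def pvJoinC : List (List Char) → List Char
  | [] => []
  | [s] => s
  | s :: r :: rs => s ++ '_' :: pvJoinC (r :: rs)

/-- Suffixes of a (stop-free) segment starting at each 'M'. -/
def pvSufs : List Char → List (List Char)
  | [] => []
  | c :: t => (if c = 'M' then [c :: t] else []) ++ pvSufs t

theorem pvSplitC_ne_nil (l : List Char) : pvSplitC l ≠ [] := by
  cases l with
  | nil => simp [pvSplitC]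
  | cons c t =>
    simp only [pvSplitC]
    split_ifs
    · simp
    · cases h : pvSplitC t with
      | nil => exact absurd h (pvSplitC_ne_nil t)
      | cons a as => simp [List.modifyHead]

theorem pvJoin_splitC (l : List Char) : pvJoinC (pvSplitC l) = l := by
  induction l with
  | nil => simp [pvSplitC, pvJoinC]
  | cons c t ih =>
    simp only [pvSplitC]
    split_ifs with hc
    · subst hc
      cases h : pvSplitC t with
      | nil => exact absurd h (pvSplitC_ne_nil t)
      | cons a as => rw [h] at ih; simpa [pvJoinC] using ih
    · cases h : pvSplitC t with
      | nil => exact absurd h (pvSplitC_ne_nil t)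
      | cons a as =>
        rw [h] at ih
        cases as with
        | nil => simpa [pvJoinC, List.modifyHead] using ih
        | cons b bs => simpa [pvJoinC, List.modifyHead] using ih

theorem pvSplitC_no_stop (l : List Char) : ∀ s ∈ pvSplitC l, '_' ∉ s := by
  induction l with
  | nil => simp [pvSplitC]
  | cons c t ih =>
    simp only [pvSplitC]
    split_ifs with hc
    · intro s hs
      rcases List.mem_cons.mp hs with h | h
      · simp [h]
      · exact ih s h
    · cases h : pvSplitC t with
      | nil => exact absurd h (pvSplitC_ne_nil t)
      | cons a as =>
        rw [h] at ih
        intro s hs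
        rcases List.mem_cons.mp (by simpa [List.modifyHead] using hs) with h1 | h1
        · subst h1
          intro hm
          rcases List.mem_cons.mp hm with h2 | h2
          · exact hc h2.symm
          · exact ih a (by simp) h2
        · exact ih s (by simp [h1])

/-- PySem's splitOn.go on a single-char separator computes the reference split. -/
theorem pvGo_eq (sep : List Char) (hsep : sep = ['_']) :
    ∀ (fuel : Nat) (l cur : List Char) (acc : List (List Char)),
      l.length < fuel →
      PySem.Chars.splitOn.go sep fuel l cur acc
        = acc.reverse ++ (pvSplitC l).modifyHead (cur.reverse ++ ·) := by
  subst hsep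
  intro fuel
  induction fuel with
  | zero => intro l cur acc h; omega
  | succ fuel ih =>
    intro l cur acc h
    cases l with
    | nil => simp [PySem.Chars.splitOn.go, pvSplitC, List.modifyHead]
    | cons c rest =>
      simp only [PySem.Chars.splitOn.go]
      by_cases hc : c = '_'
      · subst hc
        have hp : List.isPrefixOf ['_'] ('_' :: rest) = true := by
          simp [List.isPrefixOf]
        rw [if_pos hp]
        have := ih rest [] (cur.reverse :: acc) (by simpa using Nat.lt_of_succ_lt_succ h)
        simp only [List.drop, List.length] at this ⊢
        rw [this]
        cases hsp : pvSplitC rest with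
        | nil => exact absurd hsp (pvSplitC_ne_nil rest)
        | cons a as => simp [pvSplitC, List.modifyHead, hsp]
      · have hp : List.isPrefixOf ['_'] (c :: rest) = false := by
          simp [List.isPrefixOf]
          exact fun hh => hc hh.symm
        rw [if_neg (by simp [hp])]
        have := ih rest (c :: cur) acc (by simpa using Nat.lt_of_succ_lt_succ h)
        rw [this]
        cases hsp : pvSplitC rest with
        | nil => exact absurd hsp (pvSplitC_ne_nil rest)
        | cons a as => simp [pvSplitC, hc, List.modifyHead, hsp]

theorem pvSplitOn_eq (l : List Char) :
    PySem.Chars.splitOn l ['_'] = pvSplitC l := by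
  unfold PySem.Chars.splitOn
  rw [pvGo_eq ['_'] rfl (l.length + 1) l [] [] (by omega)]
  cases h : pvSplitC l with
  | nil => exact absurd h (pvSplitC_ne_nil l)
  | cons a as => simp [List.modifyHead]

/-- A's pass over a stop-free segment: every open protein is extended by the whole
segment, and each 'M' in the segment opens a protein that ends as the suffix from it. -/
theorem pvA_seg (seg : List Char) (hseg : '_' ∉ seg) :
    ∀ (cur : List (List Char)) (prots : List String),
      seg.foldl pvStepA (cur, prots)
        = (cur.map (· ++ seg) ++ pvSufs seg, prots) := by
  induction seg with
  | nil => intro cur prots; simp [pvSufs]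
  | cons c t ih =>
    intro cur prots
    have hc : c ≠ '_' := fun h => hseg (by simp [h])
    have ht : '_' ∉ t := fun h => hseg (by simp [h])
    simp only [List.foldl_cons]
    rw [show pvStepA (cur, prots) c
        = ((if c = 'M' then cur ++ [[]] else cur).map (fun p => p ++ [c]), prots) by
      simp [pvStepA, hc]]
    rw [ih ht]
    congr 1
    by_cases hM : c = 'M'
    · subst hM
      simp [pvSufs, List.map_map, Function.comp]
    · simp [pvSufs, hM, List.map_map, Function.comp]

/-- A over a joined list of stop-free segments flushes exactly the suffix-proteins of
all segments but the last. -/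
theorem pvA_join : ∀ (segs : List (List Char)), segs ≠ [] →
    (∀ s ∈ segs, '_' ∉ s) → ∀ (prots : List String),
      ((pvJoinC segs).foldl pvStepA ([], prots)).2
        = prots ++ (segs.dropLast.flatMap pvSufs).map (fun p => String.mk p) := by
  intro segs
  induction segs with
  | nil => intro h; exact absurd rfl h
  | cons s rest ih =>
    intro _ hfree prots
    cases rest with
    | nil =>
      simp only [pvJoinC]
      rw [pvA_seg s (hfree s (by simp)) [] prots]
      simp [List.dropLast]
    | cons r rs =>
      simp only [pvJoinC, List.foldl_append]
      rw [pvA_seg s (hfree s (by simp)) [] prots]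
      simp only [List.foldl_cons, List.map_nil, List.nil_append]
      have hstep : pvStepA (pvSufs s, prots) '_'
          = ([], prots ++ (pvSufs s).map (fun p => String.mk p)) := by
        by_cases h : pvSufs s = []
        · simp [pvStepA, h]
        · simp [pvStepA, h]
      rw [hstep]
      rw [ih (by simp) (fun t ht => hfree t (by simp [ht])) _]
      simp [List.flatMap_cons]

/-- B's inner loop over a segment suffix collects exactly the 'M'-suffixes. -/
theorem pvB_seg (seg : List Char) :
    ∀ (t : List Char) (k : Nat) (res : List String), seg.drop k = t →
      (PySem.List.enumerate t (k : Int)).foldl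
        (fun res p =>
          if p.2 = 'M' then
            res ++ [String.mk (PySem.List.slice seg (some p.1) none)]
          else res) res
      = res ++ (pvSufs t).map (fun p => String.mk p) := by
  intro t
  induction t with
  | nil => intro k res _; simp [PySem.List.enumerate_nil, pvSufs]
  | cons c t' ih =>
    intro k res hdrop
    rw [PySem.List.enumerate_cons]
    simp only [List.foldl_cons]
    have hdrop' : seg.drop (k + 1) = t' := by
      rw [← List.tail_drop, hdrop]; rfl
    have hcast : ((k : Int) + 1) = ((k + 1 : Nat) : Int) := by push_cast; ring
    by_cases hM : c = 'M'
    · rw [if_pos (by exact hM)]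
      rw [PySem.List.slice_from_natCast, hdrop]
      rw [hcast, ih (k + 1) _ hdrop']
      simp [pvSufs, hM]
    · rw [if_neg (by exact hM)]
      rw [hcast, ih (k + 1) _ hdrop']
      simp [pvSufs, hM]

/-- B's outer loop is a flatMap over the segments. -/
theorem pvB_outer : ∀ (segs : List (List Char)) (res : List String),
    segs.foldl
      (fun res seg =>
        (PySem.List.enumerate seg).foldl
          (fun res p =>
            if p.2 = 'M' then
              res ++ [String.mk (PySem.List.slice seg (some p.1) none)]
            else res) res) res
    = res ++ (segs.flatMap pvSufs).map (fun p => String.mk p) := by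
  intro segs
  induction segs with
  | nil => intro res; simp
  | cons s rest ih =>
    intro res
    simp only [List.foldl_cons]
    rw [show PySem.List.enumerate s = PySem.List.enumerate s ((0 : Nat) : Int) by norm_num]
    rw [pvB_seg s s 0 res (by simp)]
    rw [ih]
    simp [List.flatMap_cons]

-- ===== VERDICT (by name: the statement is the Claim_ definition above) =====
theorem proteins_from_rf_py_spec : Claim_equal_proteins_from_rf_py := by
  intro aa_seq _
  unfold Spec_proteins_from_rf_py proteins_from_rf_py proteins_from_rf_py_alt
  rw [pvSplitOn_eq, PySem.List.slice_to_neg_one, pvB_outer]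
  rw [show aa_seq.toList = pvJoinC (pvSplitC aa_seq.toList) from (pvJoin_splitC _).symm]
  rw [pvA_join (pvSplitC aa_seq.toList) (pvSplitC_ne_nil _) (pvSplitC_no_stop _) []]
  rw [pvJoin_splitC]
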